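-- pv_equiv track=rewrite | github.com/solomc1/python | ics 33/solutions/q4solution/q4solution.py | in_a_row
-- ===== SOURCE A (Python) =====
-- def in_a_row(n,iterable):
--     assert n >=2,'q4solution.in_a_row: n('+str(n)+') not >= 2'
--     answer = set()
--     it = iter(iterable)
--     try:
--         past = []
--         for _ in range(n-1):
--             past.append(next(it))
--         while True:
--             past.append(next(it))
--             if all(v==past[0] for v in past):
--                 answer.add(past[0])
--             past.pop(0)
--     except StopIteration:
--         return answer
-- ===== SOURCE B (Python) =====
-- def in_a_row(n, iterable):
--     assert n >= 2, 'q4solution.in_a_row: n('+str(n)+') not >= 2'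
--     answer = set()
--     prev = object()   # sentinel unequal to every value
--     count = 0
--     for v in iterable:
--         count = count + 1 if v == prev else 1
--         prev = v
--         if count >= n:
--             answer.add(v)
--     return answer
-- ===== Notes on version B (the rewrite author's own statement) =====
-- stated objective: faster
-- what changed: Replaces A's sliding window list (append/pop plus a full all()-scan of the n-element window at every step) with a single running counter of consecutive equal values, adding the value once the counter reaches n.
import Mathlib
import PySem

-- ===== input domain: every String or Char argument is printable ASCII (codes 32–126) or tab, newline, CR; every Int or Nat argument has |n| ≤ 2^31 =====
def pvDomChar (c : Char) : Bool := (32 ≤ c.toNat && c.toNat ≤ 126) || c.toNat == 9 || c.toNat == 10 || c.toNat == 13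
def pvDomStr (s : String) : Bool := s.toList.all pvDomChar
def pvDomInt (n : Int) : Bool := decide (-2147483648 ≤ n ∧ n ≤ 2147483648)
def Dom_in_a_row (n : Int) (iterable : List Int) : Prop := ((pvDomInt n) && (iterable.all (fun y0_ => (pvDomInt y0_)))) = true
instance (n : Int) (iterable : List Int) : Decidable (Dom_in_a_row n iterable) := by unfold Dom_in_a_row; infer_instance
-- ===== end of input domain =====

-- B replaces A's sliding n-element window (append/pop + full window scan each step)
-- with a running counter of consecutive equal values (objective: faster, asymptotic).
-- For n < 2 the Python assert raises, so Pre_ requires 2 ≤ n.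

-- ===== PORT A =====
-- the while-loop of A: `past` is the sliding window, `rest` the unread input, `acc` the answer set
def inARowLoopA (past : List Int) (rest : List Int) (acc : List Int) : List Int :=
  match rest with
  | [] => acc                                  -- StopIteration: return answer
  | x :: rs =>
    let past' := past ++ [x]                   -- past.append(next(it))
    let acc' := if past'.all (fun v => v == past'.headD 0)   -- all(v==past[0] for v in past); past' is nonempty
                then PySem.Set.add acc (past'.headD 0) else acc
    inARowLoopA past'.tail rs acc'             -- past.pop(0)

def in_a_row (n : Int) (iterable : List Int) : List Int :=
  if 2 ≤ n then
    if iterable.length < (n - 1).toNat then [] -- StopIteration while filling `past`: answer still empty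
    else inARowLoopA (iterable.take (n - 1).toNat) (iterable.drop (n - 1).toNat) []
  else []                                      -- assert fails (outside Pre_)

-- ===== PORT B =====
-- the for-loop of B: `prev`/`count` is the running run of consecutive equal values
def inARowLoopB (n : Int) (rest : List Int) (prev : Option Int) (count : Int) (acc : List Int) : List Int :=
  match rest with
  | [] => acc
  | x :: rs =>
    let count' := if prev == some x then count + 1 else 1
    let acc' := if n ≤ count' then PySem.Set.add acc x else acc
    inARowLoopB n rs (some x) count' acc'

def in_a_row_alt (n : Int) (iterable : List Int) : List Int :=
  if 2 ≤ n then inARowLoopB n iterable none 0 []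
  else []                                      -- assert fails (outside Pre_)

-- ===== PRECONDITION & SPEC =====
-- A raises AssertionError for n < 2; it returns normally on every other input.
def Pre_in_a_row (n : Int) (iterable : List Int) : Prop := 2 ≤ n
instance (n : Int) (iterable : List Int) : Decidable (Pre_in_a_row n iterable) := by unfold Pre_in_a_row; infer_instance
def pvWitness_in_a_row : Int × List Int := (2, [1, 1, 3])

def Spec_in_a_row (n : Int) (iterable : List Int) (out : List Int) : Prop := out = in_a_row_alt n iterable
instance (n : Int) (iterable : List Int) (out : List Int) : Decidable (Spec_in_a_row n iterable out) := by unfold Spec_in_a_row; infer_instance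

-- ===== CLAIM (what is proved, stated in full; the proofs are below) =====
def Claim_equal_in_a_row : Prop := ∀ (n : Int) (iterable : List Int), Dom_in_a_row n iterable → Pre_in_a_row n iterable → Spec_in_a_row n iterable (in_a_row n iterable)

-- ===== LEMMAS AND PROOFS =====

-- "all elements of l are pairwise equal" (the content of A's window test)
def AllC (l : List Int) : Prop := ∀ a ∈ l, ∀ b ∈ l, a = b

theorem allC_bridge (l : List Int) :
    (l.all (fun v => v == l.headD 0)) = true ↔ AllC l := by
  cases l with
  | nil => simp [AllC]
  | cons h t =>
    simp only [List.all_eq_true, List.headD_cons, beq_iff_eq, AllC]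
    constructor
    · intro H a ha b hb
      rw [H a ha, H b hb]
    · intro H a ha
      exact H a ha h (List.mem_cons_self)

theorem getLast?_drop_of_lt (l : List Int) (m : Nat) (h : m < l.length) :
    (l.drop m).getLast? = l.getLast? := by
  induction l generalizing m with
  | nil => simp at h
  | cons x t ih =>
    cases m with
    | zero => rfl
    | succ m' =>
      simp only [List.drop_succ_cons]
      rw [ih m' (by simpa using h)]
      cases ht : t with
      | nil => simp [ht] at h
      | cons y u => simp [List.getLast?_cons_cons]

theorem mem_of_getLast?_eq {l : List Int} {x : Int} (h : l.getLast? = some x) : x ∈ l := by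
  cases l with
  | nil => simp at h
  | cons a t =>
    have := List.getLast?_eq_some_getLast (l := a :: t) (by simp)
    rw [this] at h
    injection h with h'
    rw [← h']
    exact List.getLast_mem _


theorem exists_getLast' {l : List Int} (h : l ≠ []) : ∃ y, l.getLast? = some y := by
  cases l with
  | nil => exact absurd rfl h
  | cons a t => exact ⟨(a :: t).getLast (by simp), List.getLast?_eq_some_getLast (by simp)⟩

theorem allC_append_last {s : List Int} {x : Int} (hs : s.getLast? = some x) :
    AllC (s ++ [x]) ↔ AllC s := by
  have hxmem : x ∈ s := mem_of_getLast?_eq hs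
  constructor
  · intro H a ha b hb
    exact H a (by simp [ha]) b (by simp [hb])
  · intro H a ha b hb
    simp only [List.mem_append, List.mem_singleton] at ha hb
    rcases ha with ha | ha <;> rcases hb with hb | hb
    · exact H a ha b hb
    · rw [hb]; exact H a ha x hxmem
    · rw [ha]; exact (H b hb x hxmem).symm
    · rw [ha, hb]

theorem not_allC_append {s : List Int} {x y : Int} (hs : s.getLast? = some y) (hxy : y ≠ x) :
    ¬ AllC (s ++ [x]) := by
  intro H
  exact hxy (H y (by simp [mem_of_getLast?_eq hs]) x (by simp))

-- invariant of B's loop state relative to the processed prefix `p`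
def RunInv (p : List Int) (count : Int) : Prop :=
  ∀ j : Nat, 1 ≤ j → j ≤ p.length → ((j : Int) ≤ count ↔ AllC (p.drop (p.length - j)))

-- phase 1: running B's loop over a short (< n) nonempty prefix adds nothing and
-- leaves a state described by RunInv
theorem loopB_prefix (n : Int) (l : List Int) (hl : l ≠ []) (hlen : (l.length : Int) < n) (hn : 2 ≤ n) :
    ∃ count : Int, 1 ≤ count ∧ count ≤ (l.length : Int) ∧ RunInv l count ∧
      ∀ rest acc, inARowLoopB n (l ++ rest) none 0 acc = inARowLoopB n rest l.getLast? count acc := by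
  induction l using List.reverseRecOn with
  | nil => exact absurd rfl hl
  | append_singleton l' x ih =>
    rcases eq_or_ne l' [] with hl'nil | hl'ne
    · subst hl'nil
      refine ⟨1, le_refl 1, by simp, ?_, ?_⟩
      · intro j hj1 hj2
        simp only [List.nil_append, List.length_cons, List.length_nil] at hj2 ⊢
        have hj : j = 1 := by omega
        subst hj
        constructor
        · intro _ a ha b hb
          simp at ha hb
          rw [ha, hb]
        · intro _
          omega
      · intro rest acc
        simp only [List.nil_append]
        have hb : ((none : Option Int) == some x) = false := rfl
        have hno : ¬ (n ≤ (1 : Int)) := by omega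
        simp [inARowLoopB, hb, hno]
    · have hlen' : (l'.length : Int) < n := by
        simp only [List.length_append, List.length_cons, List.length_nil] at hlen
        push_cast at hlen ⊢; omega
      obtain ⟨count, hc1, hcle, hinv, hrun⟩ := ih hl'ne hlen'
      obtain ⟨y, hy⟩ := exists_getLast' hl'ne
      set L := l'.length with hL
      have hLpos : 1 ≤ L := by
        rw [hL]
        cases l' with
        | nil => exact absurd rfl hl'ne
        | cons b u => simp
      refine ⟨if y = x then count + 1 else 1, ?_, ?_, ?_, ?_⟩
      · split <;> omega
      · simp only [List.length_append, List.length_cons, List.length_nil]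
        push_cast
        split <;> omega
      · intro j hj1 hj2
        have hlen_lx : (l' ++ [x]).length = L + 1 := by simp [hL]
        rw [hlen_lx] at hj2 ⊢
        have hdropeq : ∀ m : Nat, m ≤ L → (l' ++ [x]).drop m = l'.drop m ++ [x] := by
          intro m hm
          rw [List.drop_append_of_le_length (by omega)]
        by_cases hj : j = 1
        · subst hj
          have : (l' ++ [x]).drop (L + 1 - 1) = [x] := by
            have hL1 : L + 1 - 1 = L := by omega
            rw [hL1, hdropeq L (le_refl L), List.drop_eq_nil_of_le (le_of_eq hL.symm)]
            rfl
          rw [this]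
          constructor
          · intro _; intro a ha b hb; simp at ha hb; rw [ha, hb]
          · intro _; split <;> omega
        · have hj2' : 2 ≤ j := by omega
          have hsub : L + 1 - j ≤ L := by omega
          rw [hdropeq _ hsub]
          have hsuffix_ne : l'.drop (L + 1 - j) ≠ [] := by
            have : (l'.drop (L + 1 - j)).length = L - (L + 1 - j) := by simp [hL]
            intro hcon
            rw [hcon] at this
            simp at this
            omega
          have hsuffix_last : (l'.drop (L + 1 - j)).getLast? = some y := by
            rw [getLast?_drop_of_lt l' _ (by omega), hy]
          have hIH := hinv (j - 1) (by omega) (by omega)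
          have hdropIH : l'.drop (l'.length - (j - 1)) = l'.drop (L + 1 - j) := by
            congr 1
            omega
          rw [hdropIH] at hIH
          by_cases hyx : y = x
          · subst hyx
            rw [allC_append_last hsuffix_last]
            rw [← hIH]
            constructor <;> intro <;> omega
          · simp only [if_neg hyx]
            constructor
            · intro hja; exfalso; omega
            · intro hcon
              exact absurd hcon (not_allC_append hsuffix_last hyx)
      · intro rest acc
        have : l' ++ [x] ++ rest = l' ++ ([x] ++ rest) := by simp
        rw [this, hrun ([x] ++ rest) acc]
        simp only [List.singleton_append, inARowLoopB, hy]
        have hprev : ((some y : Option Int) == some x) = decide (y = x) := by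
          by_cases h : y = x <;> simp [h]
        rw [hprev]
        have hnoadd : ¬ (n ≤ if decide (y = x) = true then count + 1 else 1) := by
          have h5 : ((l' ++ [x]).length : Int) = (l'.length : Int) + 1 := by
            simp only [List.length_append, List.length_cons, List.length_nil]
            push_cast
            omega
          rw [h5] at hlen
          split <;> omega
        rw [if_neg hnoadd]
        rw [List.getLast?_concat]
        by_cases h : y = x <;> simp [h]

-- phase 2: A's sliding-window loop equals B's counter loop given the invariant
theorem loopAB (n : Int) (hn : 2 ≤ n) :
    ∀ (rest past : List Int) (count : Int) (acc : List Int),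
      past ≠ [] → (past.length : Int) = n - 1 → 1 ≤ count → RunInv past count →
      inARowLoopA past rest acc = inARowLoopB n rest past.getLast? count acc := by
  intro rest
  induction rest with
  | nil => intro past count acc _ _ _ _; rfl
  | cons x rs ih =>
    intro past count acc hne hlen hc1 hinv
    obtain ⟨y, hy⟩ := exists_getLast' hne
    set L := past.length with hL
    have hLpos : 1 ≤ L := by
      cases past with
      | nil => exact absurd rfl hne
      | cons b u => simp [hL]
    -- the window test is equivalent to the counter test
    have hwindow : AllC (past ++ [x]) ↔ (n ≤ (if y = x then count + 1 else 1)) := by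
      by_cases hyx : y = x
      · subst hyx
        rw [allC_append_last hy, if_pos rfl]
        have := hinv L hLpos (le_refl L)
        rw [← hL, Nat.sub_self, List.drop_zero] at this
        rw [← this]
        constructor <;> intro <;> omega
      · rw [if_neg hyx]
        constructor
        · intro hcon; exact absurd hcon (not_allC_append hy hyx)
        · intro h; exfalso; omega
    simp only [inARowLoopA, inARowLoopB, hy]
    have hprev : ((some y : Option Int) == some x) = decide (y = x) := by
      by_cases h : y = x <;> simp [h]
    rw [hprev]
    -- the two branches add the same element (or both skip)
    have hcond : ((past ++ [x]).all (fun v => v == (past ++ [x]).headD 0)) = true ↔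
        (n ≤ if decide (y = x) = true then count + 1 else 1) := by
      rw [allC_bridge]
      rw [hwindow]
      by_cases h : y = x <;> simp [h]
    have hheadx : AllC (past ++ [x]) → (past ++ [x]).headD 0 = x := by
      intro H
      have hx : x ∈ past ++ [x] := by simp
      have hh : (past ++ [x]).headD 0 ∈ past ++ [x] := by
        cases past with
        | nil => simp
        | cons b u => simp
      exact H _ hh _ hx
    have htail : (past ++ [x]).tail = past.tail ++ [x] := by
      cases past with
      | nil => exact absurd rfl hne
      | cons b u => simp
    -- new state satisfies the invariant
    have hne' : past.tail ++ [x] ≠ [] := by simp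
    have hlen' : ((past.tail ++ [x]).length : Int) = n - 1 := by
      have hEq : (past.tail ++ [x]).length = L := by
        simp only [List.length_append, List.length_tail, List.length_cons, List.length_nil]
        omega
      rw [hEq]
      exact hlen
    have hlast' : (past.tail ++ [x]).getLast? = some x := List.getLast?_concat
    set count' := if decide (y = x) = true then count + 1 else 1 with hcount'
    have hc1' : 1 ≤ count' := by rw [hcount']; split <;> omega
    have hinv' : RunInv (past.tail ++ [x]) count' := by
      intro j hj1 hj2
      have hlen_m : (past.tail ++ [x]).length = L := by
        simp only [List.length_append, List.length_tail, List.length_cons, List.length_nil]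
        omega
      rw [hlen_m] at hj2 ⊢
      have hdropeq : (past.tail ++ [x]).drop (L - j) = past.drop (L - j + 1) ++ [x] := by
        have h1 : L - j ≤ past.tail.length := by
          rw [List.length_tail]
          omega
        rw [List.drop_append_of_le_length h1]
        congr 1
        rw [← List.drop_one, List.drop_drop]
        congr 1
        omega
      rw [hdropeq]
      by_cases hj : j = 1
      · subst hj
        have : past.drop (L - 1 + 1) = [] := by
          apply List.drop_eq_nil_of_le
          omega
        rw [this]
        constructor
        · intro _ a ha b hb; simp at ha hb; rw [ha, hb]
        · intro _; rw [hcount']; split <;> omega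
      · have hj2' : 2 ≤ j := by omega
        have hsuffix_ne_len : (past.drop (L - j + 1)).length = j - 1 := by
          simp [hL]; omega
        have hsuffix_last : (past.drop (L - j + 1)).getLast? = some y := by
          rw [getLast?_drop_of_lt past _ (by omega), hy]
        have hIH := hinv (j - 1) (by omega) (by omega)
        have hdropIH : past.drop (past.length - (j - 1)) = past.drop (L - j + 1) := by
          congr 1
          omega
        rw [hdropIH] at hIH
        by_cases hyx : y = x
        · subst hyx
          rw [allC_append_last hsuffix_last]
          rw [hcount', if_pos (by simp)]
          rw [← hIH]
          constructor <;> intro <;> omega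
        · rw [hcount', if_neg (by simp [hyx])]
          constructor
          · intro hcon; exfalso; omega
          · intro hcon
            exact absurd hcon (not_allC_append hsuffix_last hyx)
    -- align the two accumulators, then apply the induction hypothesis
    by_cases hcnd : (n ≤ count')
    · have hA : ((past ++ [x]).all (fun v => v == (past ++ [x]).headD 0)) = true := by
        rw [hcond]; exact hcnd
      rw [if_pos hA, if_pos hcnd, hheadx ((allC_bridge _).mp hA), htail]
      have hrec := ih (past.tail ++ [x]) count' (PySem.Set.add acc x) hne' hlen' hc1' hinv'
      rw [hlast'] at hrec
      exact hrec
    · have hA : ¬ (((past ++ [x]).all (fun v => v == (past ++ [x]).headD 0)) = true) := by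
        rw [hcond]; exact hcnd
      rw [if_neg hA, if_neg hcnd, htail]
      have hrec := ih (past.tail ++ [x]) count' acc hne' hlen' hc1' hinv'
      rw [hlast'] at hrec
      exact hrec

-- ===== VERDICT (by name: the statement is the Claim_ definition above) =====
theorem in_a_row_spec : Claim_equal_in_a_row := by
  intro n iterable _ hpre
  have h2 : 2 ≤ n := hpre
  unfold Spec_in_a_row in_a_row in_a_row_alt
  rw [if_pos h2, if_pos h2]
  set k := (n - 1).toNat with hk
  have hkn : (k : Int) = n - 1 := by rw [hk]; omega
  by_cases hshort : iterable.length < k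
  · rw [if_pos hshort]
    cases hit : iterable with
    | nil => rfl
    | cons a t =>
      obtain ⟨count, _, _, _, hrun⟩ := loopB_prefix n (a :: t) (by simp)
        (by rw [← hit]; omega) h2
      have := hrun [] []
      rw [List.append_nil] at this
      rw [← hit] at this ⊢
      rw [this]
      rfl
  · rw [if_neg hshort]
    have hklen : k ≤ iterable.length := by omega
    have hkpos : 1 ≤ k := by omega
    have htk_len : (iterable.take k).length = k := by simp [hklen]
    have htk_ne : iterable.take k ≠ [] := by
      intro h
      rw [h] at htk_len
      simp at htk_len
      omega
    obtain ⟨count, hc1, _, hinv, hrun⟩ := loopB_prefix n (iterable.take k) htk_ne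
      (by rw [htk_len]; omega) h2
    have hsplit : iterable.take k ++ iterable.drop k = iterable := List.take_append_drop k iterable
    have hB := hrun (iterable.drop k) []
    rw [hsplit] at hB
    rw [hB]
    rw [loopAB n h2 (iterable.drop k) (iterable.take k) count [] htk_ne
      (by rw [htk_len]; exact hkn) hc1 (by rw [← htk_len] at hinv ⊢; exact hinv)]
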